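-- pv_equiv track=rewrite | github.com/Brian-Ckwu/dsa-2023-spring | hw2/3/5.py | fuse_materials_without_heap
-- ===== SOURCE A (Python) =====
-- def fuse_materials_without_heap(a: list[int]) -> int:
--     cost = 0
--     while (len(a) > 1):
--         x = a[0]
--         y = a[1]
--         cost += x + y
--         a.remove(x)
--         a[0] = x + y
--     return cost
-- ===== SOURCE B (Python) =====
-- def fuse_materials_without_heap(a: list[int]) -> int:
--     # Single pass: running prefix sum added to cost at each element after the first.
--     # (A mutates its argument down to one element; B does not — return value only.)
--     if not a:
--         return 0
--     run = a[0]
--     cost = 0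
--     for v in a[1:]:
--         run += v
--         cost += run
--     return cost
-- ===== Notes on version B (the rewrite author's own statement) =====
-- stated objective: faster
-- what changed: Replaced the repeated fuse-and-remove mutation of the list (each list.remove is a linear shift) by a single pass that keeps a running prefix sum and adds it to the cost at each element after the first.
import Mathlib
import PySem

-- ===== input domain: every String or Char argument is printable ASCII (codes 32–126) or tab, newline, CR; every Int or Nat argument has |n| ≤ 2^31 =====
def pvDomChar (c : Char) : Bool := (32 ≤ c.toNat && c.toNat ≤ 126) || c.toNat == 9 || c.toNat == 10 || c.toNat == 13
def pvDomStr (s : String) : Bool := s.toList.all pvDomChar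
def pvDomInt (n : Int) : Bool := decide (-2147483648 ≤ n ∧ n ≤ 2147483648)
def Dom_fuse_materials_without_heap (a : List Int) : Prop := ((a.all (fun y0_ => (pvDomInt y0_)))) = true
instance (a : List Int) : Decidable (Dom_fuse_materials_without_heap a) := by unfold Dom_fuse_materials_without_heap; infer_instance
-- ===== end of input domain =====

-- B: one linear pass with a running prefix sum instead of A's quadratic fuse-and-remove
-- list mutation; equal return values (A empties its argument in place, B does not mutate).

-- ===== PORT A =====
-- the while loop: while len(a) > 1, fuse a[0] and a[1] (cost += x+y; a.remove(x)
-- deletes a[0] since x = a[0]; then a[0] = x+y), carrying (cost, a) as loop state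
def fuseLoopA (cost : Int) (a : List Int) : Int :=
  match a with
  | x :: y :: rest => fuseLoopA (cost + x + y) ((x + y) :: rest)
  | _ => cost
termination_by a.length
decreasing_by simp

def fuse_materials_without_heap (a : List Int) : Int := fuseLoopA 0 a

-- ===== PORT B =====
def fuse_materials_without_heap_alt (a : List Int) : Int :=
  match a with
  | [] => 0
  | h :: t =>
    (t.foldl (fun (p : Int × Int) v => (p.1 + v, p.2 + (p.1 + v))) (h, 0)).2

-- ===== PRECONDITION & SPEC =====
def Spec_fuse_materials_without_heap (a : List Int) (out : Int) : Prop := out = fuse_materials_without_heap_alt a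
instance (a : List Int) (out : Int) : Decidable (Spec_fuse_materials_without_heap a out) := by unfold Spec_fuse_materials_without_heap; infer_instance

-- ===== CLAIM (what is proved, stated in full; the proofs are below) =====
def Claim_equal_fuse_materials_without_heap : Prop := ∀ (a : List Int), Dom_fuse_materials_without_heap a → Spec_fuse_materials_without_heap a (fuse_materials_without_heap a)

-- ===== LEMMAS AND PROOFS =====
theorem fuseLoopA_eq_foldl (t : List Int) : ∀ (run cost : Int),
    fuseLoopA cost (run :: t)
      = (t.foldl (fun (p : Int × Int) v => (p.1 + v, p.2 + (p.1 + v))) (run, cost)).2 := by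
  induction t with
  | nil => intro run cost; simp [fuseLoopA]
  | cons y rest ih =>
    intro run cost
    rw [fuseLoopA]
    simp only [List.foldl_cons]
    rw [ih (run + y) (cost + run + y)]
    ring_nf

-- ===== VERDICT (by name: the statement is the Claim_ definition above) =====
theorem fuse_materials_without_heap_spec : Claim_equal_fuse_materials_without_heap := by
  intro a _
  unfold Spec_fuse_materials_without_heap fuse_materials_without_heap fuse_materials_without_heap_alt
  cases a with
  | nil => simp [fuseLoopA]
  | cons h t => exact fuseLoopA_eq_foldl t h 0
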